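-- pv_equiv track=rewrite | github.com/Kkokkomu/algorithm | guyeon/week15/1706.py | splt
-- ===== SOURCE A (Python) =====
-- def splt(st):
--     res = []
--
--     li = list(st)
--     ss = ""
--     for l in li:
--         if l != '#':
--             ss += l
--         else:
--             if len(ss) > 1:
--                 res.append(ss)
--             ss = ""
--     if len(ss) > 1:
--         res.append(ss)
--
--     return res
--
-- res = "zzzzzzzzzzzzzzzzzzzzzzzzz"
-- ===== SOURCE B (Python) =====
-- def splt(st):
--     return [s for s in st.split('#') if len(s) > 1]
-- ===== Notes on version B (the rewrite author's own statement) =====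
-- stated objective: simpler
-- what changed: Replaces A's character-level accumulator/flush state machine with a one-line delimiter split followed by a stateless length filter over whole segments.
import Mathlib
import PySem

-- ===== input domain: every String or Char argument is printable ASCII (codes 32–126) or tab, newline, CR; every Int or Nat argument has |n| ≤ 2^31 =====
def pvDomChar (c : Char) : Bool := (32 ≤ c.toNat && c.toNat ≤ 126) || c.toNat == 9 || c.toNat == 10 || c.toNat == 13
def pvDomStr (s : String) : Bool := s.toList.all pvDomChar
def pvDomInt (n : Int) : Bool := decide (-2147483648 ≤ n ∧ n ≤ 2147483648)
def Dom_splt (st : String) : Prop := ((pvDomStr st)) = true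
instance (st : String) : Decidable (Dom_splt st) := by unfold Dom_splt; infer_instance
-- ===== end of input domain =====

-- B replaces A's character-level accumulator/flush state machine with split-on-'#' then a stateless length filter (objective: simpler).


-- ===== PORT A =====
-- A's loop body; the running segment ss is kept as List Char (string facts are proved on the list side).
def spltStep (acc : List (List Char) × List Char) (l : Char) : List (List Char) × List Char :=
  if l ≠ '#' then (acc.1, acc.2 ++ [l])
  else if acc.2.length > 1 then (acc.1 ++ [acc.2], []) else (acc.1, [])

def splt (st : String) : List String :=
  let li := st.toList
  let p := li.foldl spltStep ([], [])
  (if p.2.length > 1 then p.1 ++ [p.2] else p.1).map String.ofList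

-- ===== PORT B =====
def splt_alt (st : String) : List String :=
  ((PySem.Chars.splitOn st.toList ['#']).filter (fun s => s.length > 1)).map String.ofList

-- ===== PRECONDITION & SPEC =====
def Spec_splt (st : String) (out : List String) : Prop := out = splt_alt st
instance (st : String) (out : List String) : Decidable (Spec_splt st out) := by unfold Spec_splt; infer_instance

-- ===== CLAIM (what is proved, stated in full; the proofs are below) =====
def Claim_equal_splt : Prop := ∀ (st : String), Dom_splt st → Spec_splt st (splt st)

-- ===== LEMMAS AND PROOFS =====

-- Reference segmentation: split on '#', `pre` being the partial segment already read.
def mySplit (pre : List Char) : List Char → List (List Char)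
  | [] => [pre]
  | c :: rest => if c = '#' then pre :: mySplit [] rest else mySplit (pre ++ [c]) rest

lemma go_single (l : List Char) : ∀ (fuel : Nat) (cur : List Char) (acc : List (List Char)),
    l.length < fuel →
    PySem.Chars.splitOn.go ['#'] fuel l cur acc = acc.reverse ++ mySplit cur.reverse l := by
  induction l with
  | nil =>
    intro fuel cur acc h
    cases fuel with
    | zero => omega
    | succ f => simp [PySem.Chars.splitOn.go, mySplit]
  | cons c rest ih =>
    intro fuel cur acc h
    cases fuel with
    | zero => omega
    | succ f =>
      rw [PySem.Chars.splitOn.go]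
      by_cases hc : c = '#'
      · subst hc
        have hp : List.isPrefixOf ['#'] ('#' :: rest) = true := by
          simp [List.isPrefixOf]
        simp only [hp, if_pos, List.length_cons, List.drop_succ_cons, List.length_nil,
          List.drop_zero]
        rw [ih f [] (cur.reverse :: acc) (by simp at h ⊢; omega)]
        simp [mySplit]
      · have hp : List.isPrefixOf ['#'] (c :: rest) = false := by
          simp [List.isPrefixOf]
          intro h'; exact hc h'.symm
        simp only [hp, Bool.false_eq_true, if_false]
        rw [ih f (c :: cur) acc (by simp at h ⊢; omega)]
        simp [mySplit, hc]

lemma fold_spec (l : List Char) : ∀ (res : List (List Char)) (ss : List Char),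
    (let p := l.foldl spltStep (res, ss)
     if p.2.length > 1 then p.1 ++ [p.2] else p.1)
      = res ++ (mySplit ss l).filter (fun s => s.length > 1) := by
  induction l with
  | nil =>
    intro res ss
    simp only [List.foldl_nil, mySplit, List.filter]
    by_cases h : ss.length > 1 <;> simp [h]
  | cons c rest ih =>
    intro res ss
    simp only [List.foldl_cons]
    by_cases hc : c = '#'
    · subst hc
      by_cases h : ss.length > 1
      · rw [show spltStep (res, ss) '#' = (res ++ [ss], []) by simp [spltStep, h]]
        rw [ih]
        simp [mySplit, h]
      · rw [show spltStep (res, ss) '#' = (res, []) by simp [spltStep]; omega]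
        rw [ih]
        simp [mySplit, show ¬ (1 < ss.length) from h]
    · rw [show spltStep (res, ss) c = (res, ss ++ [c]) by simp [spltStep, hc]]
      rw [ih]
      simp [mySplit, hc]

-- ===== VERDICT (by name: the statement is the Claim_ definition above) =====
theorem splt_spec : Claim_equal_splt := by
  intro st _
  unfold Spec_splt splt splt_alt
  rw [PySem.Chars.splitOn,
    go_single st.toList (st.toList.length + 1) [] [] (by omega)]
  simp only []
  rw [show (let p := st.toList.foldl spltStep ([], []);
      List.map String.ofList (if p.2.length > 1 then p.1 ++ [p.2] else p.1))
    = List.map String.ofList (let p := st.toList.foldl spltStep ([], []);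
      if p.2.length > 1 then p.1 ++ [p.2] else p.1) from rfl]
  rw [fold_spec st.toList [] []]
  simp
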